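-- pv_equiv track=rewrite | github.com/SSZX866/leetcode | 二分/2.middle/1011. 在 D 天内送达包裹的能力.py | check
-- ===== SOURCE A (Python) =====
-- def check(target, weights, D):
--     d, tmp = 1, 0
--     for weight in weights:
--         tmp += weight
--         if tmp <= target:
--             continue
--         else:
--             d += 1
--             tmp = weight
--     return d <= D
-- ===== SOURCE B (Python) =====
-- def _fill(target, load, weights, i):
--     # inner day loop: keep taking weights while they fit on top of `load`
--     n = len(weights)
--     while i < n and load + weights[i] <= target:
--         load += weights[i]
--         i += 1
--     return i
--
--
-- def check(target, weights, D):
--     # Simulate at most D shipping days with a cursor; succeed once everything is shipped.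
--     n = len(weights)
--     i = _fill(target, 0, weights, 0)      # day 1 starts empty
--     days_left = D - 1
--     while days_left > 0 and i < n:
--         i = _fill(target, weights[i], weights, i + 1)  # next day opens with the overflow item
--         days_left -= 1
--     return i == n and D >= 1
-- ===== Notes on version B (the rewrite author's own statement) =====
-- stated objective: alternative
-- what changed: A counts all greedy groups in one fold over the whole list and compares the count to D; B simulates at most D shipping days with an index cursor (stopping as soon as the day budget or the list runs out) and returns whether the cursor consumed all weights.
import Mathlib
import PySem

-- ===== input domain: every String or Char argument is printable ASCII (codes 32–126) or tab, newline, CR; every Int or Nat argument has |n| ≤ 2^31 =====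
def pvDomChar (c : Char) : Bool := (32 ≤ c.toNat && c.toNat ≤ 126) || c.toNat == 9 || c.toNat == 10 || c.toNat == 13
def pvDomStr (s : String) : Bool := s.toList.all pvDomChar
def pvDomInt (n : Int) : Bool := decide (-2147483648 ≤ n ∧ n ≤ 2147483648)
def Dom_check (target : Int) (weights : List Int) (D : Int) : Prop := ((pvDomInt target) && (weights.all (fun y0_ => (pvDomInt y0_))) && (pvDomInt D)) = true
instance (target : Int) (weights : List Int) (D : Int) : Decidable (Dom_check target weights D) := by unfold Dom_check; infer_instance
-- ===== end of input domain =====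

-- B replaces A's full one-fold group count compared to D by a bounded simulation of at
-- most D days with an index cursor, returning whether all weights were consumed
-- (objective: alternative); proved equal on all inputs.


-- ===== PORT A =====
def check (target : Int) (weights : List Int) (D : Int) : Bool :=
  let s := weights.foldl
    (fun (st : Int × Int) weight =>
      let tmp := st.2 + weight
      if tmp ≤ target then (st.1, tmp) else (st.1 + 1, weight))
    (1, 0)
  decide (s.1 ≤ D)

-- ===== PORT B =====
-- tiny termination lemmas cited by the ports' `decreasing_by` (kept above the claim block for that reason)
theorem pvTermSucc {n i : Nat} (h : i < n) : n - (i + 1) < n - i :=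
  Nat.sub_succ_lt_self n i h

theorem pvTermGe {n i j : Nat} (hij : i + 1 ≤ j) (hi : i < n) : n - j < n - i :=
  Nat.lt_of_le_of_lt (Nat.sub_le_sub_left hij n) (Nat.sub_succ_lt_self n i hi)

-- _fill: inner day loop, keep taking weights while they fit on top of `load`
def fillIdx (target load : Int) (weights : List Int) (i : Nat) : Nat :=
  if h : i < weights.length then
    if load + weights[i] ≤ target then fillIdx target (load + weights[i]) weights (i + 1)
    else i
  else i
  termination_by weights.length - i
  decreasing_by exact pvTermSucc h

theorem fillIdx_ge (target load : Int) (weights : List Int) (i : Nat) :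
    i ≤ fillIdx target load weights i := by
  unfold fillIdx
  split
  · split
    · exact Nat.le_trans (Nat.le_succ i) (fillIdx_ge target _ weights (i + 1))
    · exact Nat.le_refl i
  · exact Nat.le_refl i
  termination_by weights.length - i

-- the `while days_left > 0 and i < n:` loop of B's check
def daysLoop (target : Int) (weights : List Int) (i : Nat) (daysLeft : Int) : Nat :=
  if h : 0 < daysLeft ∧ i < weights.length then
    daysLoop target weights (fillIdx target weights[i] weights (i + 1)) (daysLeft - 1)
  else i
  termination_by weights.length - i
  decreasing_by exact pvTermGe (fillIdx_ge target weights[i] weights (i + 1)) h.2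

def check_alt (target : Int) (weights : List Int) (D : Int) : Bool :=
  let i := fillIdx target 0 weights 0
  let j := daysLoop target weights i (D - 1)
  decide (j = weights.length ∧ 1 ≤ D)

-- ===== PRECONDITION & SPEC =====
def Spec_check (target : Int) (weights : List Int) (D : Int) (out : Bool) : Prop := out = check_alt target weights D
instance (target : Int) (weights : List Int) (D : Int) (out : Bool) : Decidable (Spec_check target weights D out) := by unfold Spec_check; infer_instance

-- ===== CLAIM (what is proved, stated in full; the proofs are below) =====
def Claim_equal_check : Prop := ∀ (target : Int) (weights : List Int) (D : Int), Dom_check target weights D → Spec_check target weights D (check target weights D)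

-- ===== LEMMAS AND PROOFS =====

-- list-level version of the inner day loop
def loadDay (target load : Int) : List Int → List Int
  | [] => []
  | w :: ws => if load + w ≤ target then loadDay target (load + w) ws else w :: ws

theorem loadDay_length_le (target load : Int) (ws : List Int) :
    (loadDay target load ws).length ≤ ws.length := by
  induction ws generalizing load with
  | nil => simp [loadDay]
  | cons w ws ih =>
    simp only [loadDay]
    split
    · exact Nat.le_succ_of_le (ih _)
    · simp

-- list-level day counter (characterises A's fold)
def dayLoop (target : Int) : List Int → Int → Int
  | [], days => days
  | w :: ws, days => dayLoop target (loadDay target w ws) (days + 1)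
  termination_by ws _ => ws.length
  decreasing_by exact Nat.lt_succ_of_le (loadDay_length_le _ _ _)

-- list-level version of B's bounded day loop
def consume (target : Int) : List Int → Int → List Int
  | [], _ => []
  | w :: ws, k => if 0 < k then consume target (loadDay target w ws) (k - 1) else w :: ws
  termination_by ws _ => ws.length
  decreasing_by exact Nat.lt_succ_of_le (loadDay_length_le _ _ _)

theorem fillIdx_drop (target load : Int) (weights : List Int) (i : Nat) :
    weights.drop (fillIdx target load weights i) = loadDay target load (weights.drop i) := by
  unfold fillIdx
  split
  · rename_i h
    rw [List.drop_eq_getElem_cons h, loadDay]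
    split
    · exact fillIdx_drop target _ weights (i + 1)
    · rw [← List.drop_eq_getElem_cons h]
  · rename_i h
    rw [List.drop_eq_nil_of_le (Nat.le_of_not_lt h), loadDay]
  termination_by weights.length - i
  decreasing_by
    have : i < weights.length := by assumption
    omega

theorem daysLoop_drop (target : Int) (weights : List Int) (i : Nat) (k : Int) :
    weights.drop (daysLoop target weights i k) = consume target (weights.drop i) k := by
  unfold daysLoop
  split
  · rename_i h
    rw [List.drop_eq_getElem_cons h.2, consume, if_pos h.1,
        ← fillIdx_drop target weights[i] weights (i + 1)]
    exact daysLoop_drop target weights _ (k - 1)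
  · rename_i h
    rcases Decidable.em (i < weights.length) with hi | hi
    · rw [List.drop_eq_getElem_cons hi, consume, if_neg (by tauto),
          ← List.drop_eq_getElem_cons hi]
    · rw [List.drop_eq_nil_of_le (by omega), consume]
  termination_by weights.length - i
  decreasing_by
    have := fillIdx_ge target weights[i] weights (i + 1)
    omega

theorem fillIdx_le (target load : Int) (weights : List Int) (i : Nat)
    (hi : i ≤ weights.length) : fillIdx target load weights i ≤ weights.length := by
  unfold fillIdx
  split
  · split
    · exact fillIdx_le target _ weights (i + 1) (by omega)
    · exact hi
  · exact hi
  termination_by weights.length - i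

theorem daysLoop_le (target : Int) (weights : List Int) (i : Nat) (k : Int)
    (hi : i ≤ weights.length) : daysLoop target weights i k ≤ weights.length := by
  unfold daysLoop
  split
  · rename_i h
    exact daysLoop_le target weights _ (k - 1)
      (fillIdx_le target weights[i] weights (i + 1) (by omega))
  · exact hi
  termination_by weights.length - i
  decreasing_by
    have := fillIdx_ge target weights[i] weights (i + 1)
    omega

theorem dayLoop_shift (target : Int) (rest : List Int) (d : Int) :
    dayLoop target rest d = dayLoop target rest 0 + d := by
  induction hL : rest.length using Nat.strong_induction_on generalizing rest d with
  | _ n ih =>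
    cases rest with
    | nil => simp [dayLoop]
    | cons w ws =>
      rw [dayLoop, dayLoop,
          ih (loadDay target w ws).length (by simp [← hL]; exact loadDay_length_le _ _ _) _ (d + 1) rfl,
          ih (loadDay target w ws).length (by simp [← hL]; exact loadDay_length_le _ _ _) _ (0 + 1) rfl]
      ring

theorem dayLoop_nonneg (target : Int) (rest : List Int) :
    0 ≤ dayLoop target rest 0 := by
  induction hL : rest.length using Nat.strong_induction_on generalizing rest with
  | _ n ih =>
    cases rest with
    | nil => simp [dayLoop]
    | cons w ws =>
      rw [dayLoop, dayLoop_shift]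
      have := ih (loadDay target w ws).length
        (by simp [← hL]; exact loadDay_length_le _ _ _) _ rfl
      omega

theorem consume_nil_iff (target : Int) (rest : List Int) (k : Int) (hk : 0 ≤ k) :
    consume target rest k = [] ↔ dayLoop target rest 0 ≤ k := by
  induction hL : rest.length using Nat.strong_induction_on generalizing rest k with
  | _ n ih =>
    cases rest with
    | nil => simp [consume, dayLoop, hk]
    | cons w ws =>
      rw [consume, dayLoop, dayLoop_shift]
      have hlen : (loadDay target w ws).length < n := by
        simp [← hL]; exact loadDay_length_le _ _ _
      by_cases h : 0 < k
      · rw [if_pos h, ih _ hlen _ (k - 1) (by omega) rfl]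
        omega
      · rw [if_neg h]
        have := dayLoop_nonneg target (loadDay target w ws)
        constructor
        · intro hc; exact absurd hc (by simp)
        · intro hc; omega

-- A's fold computes the list-level day count
theorem fold_eq_dayLoop (target : Int) (ws : List Int) :
    ∀ (d tmp : Int),
      (ws.foldl
        (fun (st : Int × Int) weight =>
          let t := st.2 + weight
          if t ≤ target then (st.1, t) else (st.1 + 1, weight))
        (d, tmp)).1 = dayLoop target (loadDay target tmp ws) d := by
  induction ws with
  | nil => intro d tmp; simp [loadDay, dayLoop]
  | cons w ws ih =>
    intro d tmp
    simp only [List.foldl, loadDay]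
    by_cases h : tmp + w ≤ target
    · simp only [h, if_pos]
      exact ih d (tmp + w)
    · simp only [h, if_neg, not_false_iff]
      rw [dayLoop, ← ih (d + 1) w]

-- ===== VERDICT (by name: the statement is the Claim_ definition above) =====
theorem check_spec : Claim_equal_check := by
  intro target weights D _
  show check target weights D = check_alt target weights D
  simp only [check, check_alt]
  rw [fold_eq_dayLoop]
  have hrest : weights.drop (fillIdx target 0 weights 0) = loadDay target 0 weights := by
    simpa using fillIdx_drop target 0 weights 0
  set rest := loadDay target 0 weights with hr
  have hle : daysLoop target weights (fillIdx target 0 weights 0) (D - 1) ≤ weights.length :=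
    daysLoop_le target weights _ _ (fillIdx_le target 0 weights 0 (Nat.zero_le _))
  have hdrop : weights.drop (daysLoop target weights (fillIdx target 0 weights 0) (D - 1))
      = consume target rest (D - 1) := by
    rw [daysLoop_drop, hrest]
  have hjiff : (daysLoop target weights (fillIdx target 0 weights 0) (D - 1) = weights.length)
      ↔ consume target rest (D - 1) = [] := by
    rw [← hdrop, List.drop_eq_nil_iff]
    omega
  have h1 := dayLoop_nonneg target rest
  have h2 := dayLoop_shift target rest 1
  by_cases hD : 1 ≤ D
  · have := consume_nil_iff target rest (D - 1) (by omega)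
    simp only [decide_eq_decide]
    rw [hjiff, this]
    omega
  · simp only [decide_eq_decide]
    rw [hjiff]
    constructor
    · intro hA; omega
    · rintro ⟨-, h⟩; omega
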